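-- pv_equiv track=rewrite | github.com/mahroonoohi/Bachelor-of-Computer-Engineering | Data_Revtrial/Hws/front_coding/main.py | compress_inverted_index
-- ===== SOURCE A (Python) =====
-- def compress_inverted_index(inverted_index, prefix_size):
--     common_prefixes = {}
--
--     for word, document_ids in inverted_index.items():
--         prefix_key = word[:prefix_size]
--         if prefix_key not in common_prefixes:
--             common_prefixes[prefix_key] = {}
--         suffix = word[prefix_size:]
--         if suffix not in common_prefixes[prefix_key]:
--             common_prefixes[prefix_key][suffix] = document_ids
--
--     return common_prefixes
-- ===== SOURCE B (Python) =====
-- def compress_inverted_index(inverted_index, prefix_size):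
--     result = {}
--     for word in inverted_index:
--         prefix = word[:prefix_size]
--         if prefix not in result:
--             result[prefix] = {w[prefix_size:]: ids
--                               for w, ids in inverted_index.items()
--                               if w[:prefix_size] == prefix}
--     return result
-- ===== Notes on version B (the rewrite author's own statement) =====
-- stated objective: alternative
-- what changed: A builds the nested dict incrementally (create-bucket-then-check-then-insert per entry); B instead, on each first-seen prefix, builds that prefix's whole group at once with a comprehension over the full index, so the nested-dict bookkeeping disappears.
import Mathlib
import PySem

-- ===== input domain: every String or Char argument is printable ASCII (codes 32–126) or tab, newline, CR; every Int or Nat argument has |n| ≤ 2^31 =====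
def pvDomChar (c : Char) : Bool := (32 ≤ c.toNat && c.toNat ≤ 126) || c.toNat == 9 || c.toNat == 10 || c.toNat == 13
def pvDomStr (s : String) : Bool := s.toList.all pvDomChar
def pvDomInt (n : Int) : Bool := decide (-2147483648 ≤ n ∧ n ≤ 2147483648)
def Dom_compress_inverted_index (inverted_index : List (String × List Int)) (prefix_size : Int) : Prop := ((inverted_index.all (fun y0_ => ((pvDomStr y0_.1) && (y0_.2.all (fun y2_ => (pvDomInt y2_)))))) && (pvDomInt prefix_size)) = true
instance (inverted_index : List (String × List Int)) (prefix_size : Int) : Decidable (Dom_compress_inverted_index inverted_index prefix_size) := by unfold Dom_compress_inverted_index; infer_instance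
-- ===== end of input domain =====

-- B replaces A's incremental nested-dict insertion by a per-new-prefix rescan that builds each
-- prefix group in one comprehension (alternative decomposition, same observable result).


-- ===== PORT A =====
def compress_inverted_index (inverted_index : List (String × List Int)) (prefix_size : Int) : List (String × List (String × List Int)) :=
  let common_prefixes : PySem.Dict String (PySem.Dict String (List Int)) :=
    inverted_index.foldl (fun cp wd =>
      let prefix_key := PySem.Str.slice wd.1 none (some prefix_size)
      let cp := if cp.contains prefix_key then cp else cp.insert prefix_key PySem.Dict.empty
      let suffix := PySem.Str.slice wd.1 (some prefix_size) none
      let inner := cp.getD prefix_key PySem.Dict.empty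
      if inner.contains suffix then cp else cp.insert prefix_key (inner.insert suffix wd.2))
      PySem.Dict.empty
  common_prefixes.items.map (fun q => (q.1, q.2.items))

-- ===== PORT B =====
def compress_inverted_index_alt (inverted_index : List (String × List Int)) (prefix_size : Int) : List (String × List (String × List Int)) :=
  let result : PySem.Dict String (PySem.Dict String (List Int)) :=
    inverted_index.foldl (fun r wd =>
      let pfx := PySem.Str.slice wd.1 none (some prefix_size)
      if r.contains pfx then r
      else r.insert pfx
        ((inverted_index.filter (fun e => PySem.Str.slice e.1 none (some prefix_size) == pfx)).foldl
          (fun g e => g.insert (PySem.Str.slice e.1 (some prefix_size) none) e.2) PySem.Dict.empty))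
      PySem.Dict.empty
  result.items.map (fun q => (q.1, q.2.items))

-- ===== PRECONDITION & SPEC =====
-- Pre_ excludes association lists with a duplicated word: a Python dict has unique keys, so such a
-- list does not represent a dict argument (duplicates are collapsed before A ever runs).
def Pre_compress_inverted_index (inverted_index : List (String × List Int)) (prefix_size : Int) : Prop :=
  (inverted_index.map Prod.fst).Nodup
instance (inverted_index : List (String × List Int)) (prefix_size : Int) : Decidable (Pre_compress_inverted_index inverted_index prefix_size) := by unfold Pre_compress_inverted_index; infer_instance
def pvWitness_compress_inverted_index : (List (String × List Int)) × Int :=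
  ([("abc", [1, 2]), ("abd", [3]), ("x", [])], 2)
def Spec_compress_inverted_index (inverted_index : List (String × List Int)) (prefix_size : Int) (out : List (String × List (String × List Int))) : Prop := out = compress_inverted_index_alt inverted_index prefix_size
instance (inverted_index : List (String × List Int)) (prefix_size : Int) (out : List (String × List (String × List Int))) : Decidable (Spec_compress_inverted_index inverted_index prefix_size out) := by unfold Spec_compress_inverted_index; infer_instance

-- ===== CLAIM (what is proved, stated in full; the proofs are below) =====
def Claim_equal_compress_inverted_index : Prop := ∀ (inverted_index : List (String × List Int)) (prefix_size : Int), Dom_compress_inverted_index inverted_index prefix_size → Pre_compress_inverted_index inverted_index prefix_size → Spec_compress_inverted_index inverted_index prefix_size (compress_inverted_index inverted_index prefix_size)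

-- ===== LEMMAS AND PROOFS =====

-- the prefix / suffix of an entry's word, and the canonical group of a prefix
def pvPfx (k : Int) (e : String × List Int) : String := PySem.Str.slice e.1 none (some k)
def pvSfx (k : Int) (e : String × List Int) : String := PySem.Str.slice e.1 (some k) none
def pvGroup (k : Int) (xs : List (String × List Int)) (p : String) : List (String × List Int) :=
  (xs.filter (fun e => PySem.Str.slice e.1 none (some k) == p)).map (fun e => (pvSfx k e, e.2))
def pvKeys (k : Int) (ys : List (String × List Int)) : List String :=
  PySem.Set.ofList (ys.map (pvPfx k))

lemma pvPfx_eq (k : Int) (e : String × List Int) :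
    PySem.Str.slice e.1 none (some k) = pvPfx k e := rfl
lemma pvSfx_eq (k : Int) (e : String × List Int) :
    PySem.Str.slice e.1 (some k) none = pvSfx k e := rfl

lemma pv_slice_none_some {α : Type} (xs : List α) (i : Int) :
    PySem.List.slice xs none (some i) = xs.take (PySem.List.clampIdx xs.length i) := by
  simp [PySem.List.slice]

-- a word is its prefix-slice followed by its suffix-slice, so the pair (prefix, suffix) determines it
lemma pv_word_inj (k : Int) (w w' : String)
    (h1 : PySem.Str.slice w none (some k) = PySem.Str.slice w' none (some k))
    (h2 : PySem.Str.slice w (some k) none = PySem.Str.slice w' (some k) none) : w = w' := by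
  have h1' := congrArg String.toList h1
  have h2' := congrArg String.toList h2
  simp only [PySem.Str.toList_slice, PySem.Chars.slice_eq_listSlice, pv_slice_none_some,
    PySem.List.slice_some_none] at h1' h2'
  apply String.toList_inj.mp
  calc w.toList = w.toList.take (PySem.List.clampIdx w.toList.length k)
        ++ w.toList.drop (PySem.List.clampIdx w.toList.length k) := (List.take_append_drop _ _).symm
    _ = w'.toList.take (PySem.List.clampIdx w'.toList.length k)
        ++ w'.toList.drop (PySem.List.clampIdx w'.toList.length k) := by rw [h1', h2']
    _ = w'.toList := List.take_append_drop _ _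

lemma pv_entry_inj (k : Int) (xs : List (String × List Int))
    (hN : (xs.map Prod.fst).Nodup) {e e' : String × List Int}
    (he : e ∈ xs) (he' : e' ∈ xs)
    (hp : pvPfx k e = pvPfx k e') (hs : pvSfx k e = pvSfx k e') : e = e' :=
  List.inj_on_of_nodup_map hN he he' (pv_word_inj k e.1 e'.1 hp hs)

lemma pv_group_fst_nodup (k : Int) (xs : List (String × List Int))
    (hN : (xs.map Prod.fst).Nodup) (p : String) :
    ((xs.filter (fun e => PySem.Str.slice e.1 none (some k) == p)).map
      (fun e => PySem.Str.slice e.1 (some k) none)).Nodup := by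
  have hx : xs.Nodup := hN.of_map
  refine List.Nodup.map_on ?_ (hx.filter _)
  intro e he e' he' hsfx
  have hpe : pvPfx k e = p := by
    have := List.of_mem_filter he; simpa [pvPfx] using this
  have hpe' : pvPfx k e' = p := by
    have := List.of_mem_filter he'; simpa [pvPfx] using this
  exact pv_entry_inj k xs hN (List.mem_of_mem_filter he) (List.mem_of_mem_filter he')
    (hpe.trans hpe'.symm) hsfx

-- a loop inserting a key-determined value only at fresh keys appends the new keys in first-occurrence order
lemma pv_items_foldl_addNew {ν : Type} (g : String → ν) (ps : List String) :
    (ps.foldl (fun (r : PySem.Dict String ν) p => if r.contains p then r else r.insert p (g p))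
      PySem.Dict.empty).items
      = (PySem.Set.ofList ps).map (fun p => (p, g p)) := by
  induction ps using List.reverseRecOn with
  | nil => rfl
  | append_singleton ps p ih =>
    rw [List.foldl_append, PySem.Set.ofList_append_singleton]
    simp only [List.foldl_cons, List.foldl_nil]
    set d := ps.foldl (fun (r : PySem.Dict String ν) p => if r.contains p then r else r.insert p (g p)) PySem.Dict.empty with hd
    have hkeys : d.keys = PySem.Set.ofList ps := by
      simp only [PySem.Dict.keys, ih, List.map_map]; simp [Function.comp_def]
    have hcont : d.contains p = decide (p ∈ (PySem.Set.ofList ps : List String)) := by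
      rw [PySem.Dict.contains_eq_decide_mem_keys, hkeys]
    by_cases hp : p ∈ (PySem.Set.ofList ps : List String)
    · simp only [hcont, hp, decide_true, if_true, ih, PySem.Set.add_of_mem hp]
    · simp only [hcont, hp, decide_false, Bool.false_eq_true, if_false]
      rw [PySem.Dict.items_insert_of_not_contains d (g p) (by rw [hcont]; simp [hp]), ih,
        PySem.Set.add_of_not_mem hp, List.map_append]
      simp

lemma pvGroup_append (k : Int) (ys : List (String × List Int)) (e : String × List Int) (p' : String) :
    pvGroup k (ys ++ [e]) p'
      = pvGroup k ys p' ++ (if pvPfx k e == p' then [(pvSfx k e, e.2)] else []) := by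
  simp only [pvGroup, List.filter_append, List.map_append, List.filter_cons, List.filter_nil, pvPfx]
  split <;> simp

-- A's loop, characterised: groups in first-occurrence prefix order, members in input order
lemma pvA_items (k : Int) (ys : List (String × List Int)) (h : (ys.map Prod.fst).Nodup) :
    (ys.foldl (fun cp wd =>
      let prefix_key := PySem.Str.slice wd.1 none (some k)
      let cp := if cp.contains prefix_key then cp else cp.insert prefix_key PySem.Dict.empty
      let suffix := PySem.Str.slice wd.1 (some k) none
      let inner := cp.getD prefix_key PySem.Dict.empty
      if inner.contains suffix then cp else cp.insert prefix_key (inner.insert suffix wd.2))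
      PySem.Dict.empty).items
      = (pvKeys k ys).map (fun p => (p, PySem.Dict.mk (pvGroup k ys p))) := by
  induction ys using List.reverseRecOn with
  | nil => rfl
  | append_singleton ys e ih =>
    have hsplit : (ys.map Prod.fst).Nodup ∧ e.1 ∉ ys.map Prod.fst := by
      rw [List.map_append] at h
      exact ⟨h.of_append_left, fun hm => (List.disjoint_of_nodup_append h) hm (by simp)⟩
    obtain ⟨hys, he1⟩ := hsplit
    have hitems := ih hys
    rw [List.foldl_append]
    simp only [List.foldl_cons, List.foldl_nil]
    set d := ys.foldl (fun cp wd =>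
      let prefix_key := PySem.Str.slice wd.1 none (some k)
      let cp := if cp.contains prefix_key then cp else cp.insert prefix_key PySem.Dict.empty
      let suffix := PySem.Str.slice wd.1 (some k) none
      let inner := cp.getD prefix_key PySem.Dict.empty
      if inner.contains suffix then cp else cp.insert prefix_key (inner.insert suffix wd.2))
      PySem.Dict.empty with hd
    have hkeys : d.keys = pvKeys k ys := by
      simp only [PySem.Dict.keys, hitems, List.map_map]
      simp [Function.comp_def]
    have hknd : d.keys.Nodup := by rw [hkeys]; exact PySem.Set.nodup_ofList _
    have hcont : d.contains (pvPfx k e) = decide (pvPfx k e ∈ pvKeys k ys) := by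
      rw [PySem.Dict.contains_eq_decide_mem_keys, hkeys]
    simp only [pvPfx_eq, pvSfx_eq]
    have hKeysApp : pvKeys k (ys ++ [e]) = PySem.Set.add (pvKeys k ys) (pvPfx k e) := by
      simp only [pvKeys, List.map_append, List.map_cons, List.map_nil,
        PySem.Set.ofList_append_singleton]
    by_cases hp : pvPfx k e ∈ pvKeys k ys
    · -- prefix already present
      rw [hcont]
      simp only [hp, decide_true, if_true]
      have hmem : (pvPfx k e, PySem.Dict.mk (pvGroup k ys (pvPfx k e))) ∈ d.items := by
        rw [hitems]; exact List.mem_map_of_mem hp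
      have hinner : d.getD (pvPfx k e) PySem.Dict.empty = PySem.Dict.mk (pvGroup k ys (pvPfx k e)) :=
        PySem.Dict.getD_of_mem_items d hmem hknd _
      rw [hinner]
      have hScont : (PySem.Dict.mk (pvGroup k ys (pvPfx k e))).contains (pvSfx k e) = false := by
        rw [PySem.Dict.contains_eq_decide_mem_keys]
        simp only [PySem.Dict.keys, decide_eq_false_iff_not]
        intro hmem
        simp only [pvGroup, List.map_map, List.mem_map, Function.comp_def] at hmem
        obtain ⟨e', he'f, hs'⟩ := hmem
        have hp' : pvPfx k e' = pvPfx k e := by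
          have := List.of_mem_filter he'f
          simpa [pvPfx] using this
        have h1 : e'.1 = e.1 := pv_word_inj k e'.1 e.1 hp' hs'
        exact he1 (h1 ▸ List.mem_map_of_mem (List.mem_of_mem_filter he'f))
      simp only [hScont, Bool.false_eq_true, if_false]
      have hIns : (PySem.Dict.mk (pvGroup k ys (pvPfx k e))).insert (pvSfx k e) e.2
          = PySem.Dict.mk (pvGroup k ys (pvPfx k e) ++ [(pvSfx k e, e.2)]) := by
        apply PySem.Dict.ext
        rw [PySem.Dict.items_insert_of_not_contains _ _ hScont]
      rw [hIns, PySem.Dict.items_insert_of_contains d _ (by rw [hcont]; simp [hp]),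
        hitems, hKeysApp, PySem.Set.add_of_mem hp, List.map_map]
      apply List.map_congr_left
      intro p' hp'
      by_cases hpp : p' = pvPfx k e
      · subst hpp
        simp [pvGroup_append]
      · have hb1 : (p' == pvPfx k e) = false := beq_eq_false_iff_ne.mpr hpp
        have hb2 : (pvPfx k e == p') = false := beq_eq_false_iff_ne.mpr (Ne.symm hpp)
        simp [pvGroup_append, hb2]
        exact fun hEq => absurd hEq hpp
    · -- fresh prefix
      rw [hcont]
      simp only [hp, decide_false, Bool.false_eq_true, if_false]
      rw [PySem.Dict.getD_insert_self]
      simp only [PySem.Dict.contains_empty, Bool.false_eq_true, if_false]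
      rw [PySem.Dict.insert_insert_self]
      have hEmpIns : (PySem.Dict.empty : PySem.Dict String (List Int)).insert (pvSfx k e) e.2
          = PySem.Dict.mk [(pvSfx k e, e.2)] := by
        apply PySem.Dict.ext
        rw [PySem.Dict.items_insert_of_not_contains _ _ (PySem.Dict.contains_empty _)]
        rfl
      have hPnotList : pvPfx k e ∉ ys.map (pvPfx k) := fun hm => hp ((PySem.Set.mem_ofList _ _).mpr hm)
      rw [hEmpIns, PySem.Dict.items_insert_of_not_contains d _ (by rw [hcont]; simp [hp]),
        hitems, hKeysApp, PySem.Set.add_of_not_mem hp, List.map_append]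
      congr 1
      · apply List.map_congr_left
        intro p' hp'
        have hne : pvPfx k e ≠ p' := fun hEq => hp (hEq ▸ hp')
        have hb : (pvPfx k e == p') = false := beq_eq_false_iff_ne.mpr hne
        simp [pvGroup_append, hb]
      · have hnil : pvGroup k ys (pvPfx k e) = [] := by
          simp only [pvGroup]
          rw [List.filter_eq_nil_iff.mpr, List.map_nil]
          intro e' he' hbeq
          exact hPnotList (by
            have : pvPfx k e' = pvPfx k e := by simpa [pvPfx] using hbeq
            exact this ▸ List.mem_map_of_mem he')
        simp [pvGroup_append, hnil]

-- ===== VERDICT (by name: the statement is the Claim_ definition above) =====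
theorem compress_inverted_index_spec : Claim_equal_compress_inverted_index := by
  intro xs k _ hpre
  unfold Spec_compress_inverted_index
  unfold Pre_compress_inverted_index at hpre
  unfold compress_inverted_index compress_inverted_index_alt
  dsimp only
  rw [pvA_items k xs hpre]
  have hB : xs.foldl (fun (r : PySem.Dict String (PySem.Dict String (List Int))) wd =>
      let pfx := PySem.Str.slice wd.1 none (some k)
      if r.contains pfx then r
      else r.insert pfx
        ((xs.filter (fun e => PySem.Str.slice e.1 none (some k) == pfx)).foldl
          (fun g e => g.insert (PySem.Str.slice e.1 (some k) none) e.2) PySem.Dict.empty))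
      PySem.Dict.empty
    = (xs.map (pvPfx k)).foldl (fun (r : PySem.Dict String (PySem.Dict String (List Int))) p =>
        if r.contains p then r
        else r.insert p
          ((xs.filter (fun e => PySem.Str.slice e.1 none (some k) == p)).foldl
            (fun g e => g.insert (PySem.Str.slice e.1 (some k) none) e.2) PySem.Dict.empty))
      PySem.Dict.empty := by
    rw [List.foldl_map]
    rfl
  rw [hB, pv_items_foldl_addNew]
  rw [List.map_map, List.map_map]
  apply List.map_congr_left
  intro p _
  simp only [Function.comp_def]
  congr 1
  rw [PySem.Dict.items_foldl_insert_fresh _ _ _ _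
    (fun a _ => PySem.Dict.contains_empty _) (pv_group_fst_nodup k xs hpre p)]
  simp [pvGroup, pvSfx]
  rfl
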